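-- pv_equiv track=rewrite | github.com/zolihajduserious-dot/mvm-mezoenergy | .tmp_clean_mvm_pdf_template.py | cleaned_text
-- ===== SOURCE A (Python) =====
-- def cleaned_text(value: str, state: dict) -> str:
--     result = []
--
--     for char in value:
--         if state.get("inside_placeholder", False):
--             if char == "}":
--                 state["inside_placeholder"] = False
--             continue
--
--         if char == "{":
--             state["inside_placeholder"] = True
--             continue
--
--         result.append(char)
--
--     return "".join(result)
-- ===== SOURCE B (Python) =====
-- def cleaned_text(value: str, state: dict) -> str:
--     # Chunk-based rewrite using str.find instead of a per-character state machine;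
--     # it performs the same mutation of state["inside_placeholder"] as the original.
--     out = []
--     i = 0
--     if state.get("inside_placeholder", False):
--         j = value.find("}")
--         if j == -1:
--             return ""
--         state["inside_placeholder"] = False
--         i = j + 1
--     while True:
--         j = value.find("{", i)
--         if j == -1:
--             out.append(value[i:])
--             break
--         out.append(value[i:j])
--         state["inside_placeholder"] = True
--         k = value.find("}", j + 1)
--         if k == -1:
--             break
--         state["inside_placeholder"] = False
--         i = k + 1
--     return "".join(out)
-- ===== Notes on version B (the rewrite author's own statement) =====
-- stated objective: faster
-- what changed: Replaced the per-character state-machine loop (with a dict lookup per character) by a chunked scan that uses str.find to jump to the next brace and copies whole slices between placeholders, performing the same state mutation.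
import Mathlib
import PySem

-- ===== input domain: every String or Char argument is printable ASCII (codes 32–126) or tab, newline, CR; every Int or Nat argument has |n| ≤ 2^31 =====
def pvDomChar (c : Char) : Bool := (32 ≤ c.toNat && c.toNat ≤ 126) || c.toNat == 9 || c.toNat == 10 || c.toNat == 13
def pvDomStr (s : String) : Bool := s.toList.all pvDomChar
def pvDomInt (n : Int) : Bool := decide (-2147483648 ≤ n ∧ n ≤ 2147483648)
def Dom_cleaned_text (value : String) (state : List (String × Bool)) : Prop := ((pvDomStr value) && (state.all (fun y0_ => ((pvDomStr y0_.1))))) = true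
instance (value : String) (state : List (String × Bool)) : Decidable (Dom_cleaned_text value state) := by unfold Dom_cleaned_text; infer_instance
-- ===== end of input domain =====

-- B replaces A's per-character state machine by a chunked scan (find next '{' / next '}',
-- copy slices between placeholders): same return value, same mutation of state; the
-- equivalence proved here is about the RETURN value only (state is passed by value in Lean).

-- ===== PORT A =====
-- A's loop: fold over the characters carrying the (mutable) dict and the result list.
def cleaned_text (value : String) (state : List (String × Bool)) : String :=
  let step := fun (acc : PySem.Dict String Bool × List Char) (c : Char) =>
    if acc.1.getD "inside_placeholder" false then
      if c = '}' then (acc.1.insert "inside_placeholder" false, acc.2) else acc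
    else if c = '{' then (acc.1.insert "inside_placeholder" true, acc.2)
    else (acc.1, acc.2 ++ [c])
  String.mk (value.toList.foldl step (PySem.Dict.mk state, [])).2

-- ===== PORT B =====
-- Source B's while-loop: `value.find("{", i)` / `value.find("}", j+1)` together with the
-- slices `value[i:j]` are rendered on the character list as takeWhile (slice up to the
-- found brace) and dropWhile (jump to the found brace) — exact, same scan as str.find.
def bChunks (cs : List Char) : List Char :=
  let pre := cs.takeWhile (· ≠ '{')
  let rest := cs.dropWhile (· ≠ '{')
  if h1 : rest = [] then pre                          -- j == -1: append value[i:], stop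
  else
    let rest2 := rest.tail.dropWhile (· ≠ '}')
    if h2 : rest2 = [] then pre                       -- k == -1: stop (flag set True)
    else pre ++ bChunks rest2.tail
termination_by cs.length
decreasing_by
  have hd := List.length_dropWhile_le (p := fun c => decide (c ≠ '{')) (l := cs)
  have hd2 := List.length_dropWhile_le (p := fun c => decide (c ≠ '}')) (l := (cs.dropWhile (· ≠ '{')).tail)
  have e1 : 0 < (cs.dropWhile (· ≠ '{')).length := List.length_pos_of_ne_nil h1
  have e2 : 0 < ((cs.dropWhile (· ≠ '{')).tail.dropWhile (· ≠ '}')).length := List.length_pos_of_ne_nil h2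
  simp only [List.length_tail] at *
  omega

def cleaned_text_alt (value : String) (state : List (String × Bool)) : String :=
  let cs := value.toList
  if (PySem.Dict.mk state).getD "inside_placeholder" false then
    match cs.dropWhile (· ≠ '}') with    -- j = value.find("}")
    | [] => ""                           -- j == -1: return ""
    | _ :: rest => String.mk (bChunks rest)
  else String.mk (bChunks cs)

-- ===== PRECONDITION & SPEC =====
def Spec_cleaned_text (value : String) (state : List (String × Bool)) (out : String) : Prop := out = cleaned_text_alt value state
instance (value : String) (state : List (String × Bool)) (out : String) : Decidable (Spec_cleaned_text value state out) := by unfold Spec_cleaned_text; infer_instance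

-- ===== CLAIM (what is proved, stated in full; the proofs are below) =====
def Claim_equal_cleaned_text : Prop := ∀ (value : String) (state : List (String × Bool)), Dom_cleaned_text value state → Spec_cleaned_text value state (cleaned_text value state)

-- ===== LEMMAS AND PROOFS =====

-- the abstract state machine both programs implement
def mach : Bool → List Char → List Char
  | _, [] => []
  | true, c :: cs => if c = '}' then mach false cs else mach true cs
  | false, c :: cs => if c = '{' then mach true cs else c :: mach false cs

theorem foldl_eq_mach (cs : List Char) (d : PySem.Dict String Bool) (res : List Char) :
    (cs.foldl (fun (acc : PySem.Dict String Bool × List Char) (c : Char) =>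
      if acc.1.getD "inside_placeholder" false then
        if c = '}' then (acc.1.insert "inside_placeholder" false, acc.2) else acc
      else if c = '{' then (acc.1.insert "inside_placeholder" true, acc.2)
      else (acc.1, acc.2 ++ [c])) (d, res)).2
    = res ++ mach (d.getD "inside_placeholder" false) cs := by
  induction cs generalizing d res with
  | nil => simp [mach]
  | cons c cs ih =>
    by_cases hb : d.getD "inside_placeholder" false
    · by_cases hc : c = '}'
      · simp [hb, hc, mach, ih, PySem.Dict.getD_insert_self]
      · simp [hb, hc, mach, ih]
    · by_cases hc : c = '{'
      · simp [hb, hc, mach, ih, PySem.Dict.getD_insert_self]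
      · simp [hb, hc, mach, ih]

theorem mach_true_eq (cs : List Char) :
    mach true cs = (match cs.dropWhile (· ≠ '}') with
                    | [] => []
                    | _ :: r => mach false r) := by
  induction cs with
  | nil => simp [mach]
  | cons c cs ih =>
    by_cases hc : c = '}'
    · simp [mach, hc]
    · simp [mach, hc, ih]

theorem bChunks_cons_ne (c : Char) (cs : List Char) (hc : c ≠ '{') :
    bChunks (c :: cs) = c :: bChunks cs := by
  rw [bChunks, bChunks]
  simp only [List.dropWhile_cons, List.takeWhile_cons, hc, decide_not, ne_eq]
  split_ifs <;> simp_all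

theorem bChunks_cons_brace (cs : List Char) :
    bChunks ('{' :: cs) = (match cs.dropWhile (· ≠ '}') with
                           | [] => []
                           | _ :: r => bChunks r) := by
  rw [bChunks]
  simp only [List.dropWhile_cons, List.takeWhile_cons]
  simp only [ne_eq, not_true, decide_false, Bool.false_eq_true, if_false,
    List.cons_ne_nil, dite_false, List.tail_cons, decide_not]
  by_cases hd : List.dropWhile (fun x => !decide (x = '}')) cs = []
  · rw [dif_pos hd, hd]
  · rw [dif_neg hd]
    obtain ⟨y, r, hyr⟩ : ∃ y r, List.dropWhile (fun x => !decide (x = '}')) cs = y :: r := by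
      cases h : List.dropWhile (fun x => !decide (x = '}')) cs with
      | nil => exact absurd h hd
      | cons y r => exact ⟨y, r, rfl⟩
    rw [hyr]
    simp

theorem mach_false_eq_bChunks (n : ℕ) (cs : List Char) (hn : cs.length ≤ n) :
    mach false cs = bChunks cs := by
  induction n generalizing cs with
  | zero =>
    have : cs = [] := by cases cs <;> simp_all
    subst this; simp [mach, bChunks]
  | succ n ih =>
    cases cs with
    | nil => simp [mach, bChunks]
    | cons c cs =>
      by_cases hc : c = '{'
      · subst hc
        rw [bChunks_cons_brace]
        have : mach false ('{' :: cs) = mach true cs := by simp [mach]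
        rw [this, mach_true_eq]
        cases hdw : cs.dropWhile (· ≠ '}') with
        | nil => rfl
        | cons x r =>
          have hlen := List.length_dropWhile_le (p := fun c => decide (c ≠ '}')) (l := cs)
          rw [hdw] at hlen
          simp at hlen hn
          exact ih r (by omega)
      · rw [bChunks_cons_ne c cs hc]
        have : mach false (c :: cs) = c :: mach false cs := by simp [mach, hc]
        rw [this, ih cs (by simp at hn; omega)]

-- ===== VERDICT (by name: the statement is the Claim_ definition above) =====
theorem cleaned_text_spec : Claim_equal_cleaned_text := by
  intro value state _
  unfold Spec_cleaned_text cleaned_text cleaned_text_alt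
  simp only
  rw [foldl_eq_mach]
  by_cases hb : (PySem.Dict.mk state).getD "inside_placeholder" false
  · simp only [hb, if_true, List.nil_append, mach_true_eq]
    cases hdw : value.toList.dropWhile (· ≠ '}') with
    | nil => rfl
    | cons x r =>
      show String.mk (mach false r) = String.mk (bChunks r)
      rw [mach_false_eq_bChunks r.length r le_rfl]
  · simp only [hb, if_false, List.nil_append, Bool.false_eq_true]
    rw [mach_false_eq_bChunks value.toList.length _ le_rfl]
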